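-- pv_equiv track=rewrite | github.com/syazra/prak-daspro | Hackerrank/9/9E2_Kacang Risu.py | NbEmpty
-- ===== SOURCE A (Python) =====
-- def FirstList(S):
--     return S[0]
--
-- def TailList(S):
--     return S[1:]
--
-- def IsEmpty(S):
--     return S == []
--
-- def NbEmpty(S):
--     if IsEmpty(S):
--         return 0
--     else:
--         if IsEmpty(FirstList(S)):
--             return 1 + NbEmpty(TailList(S))
--         else:
--             return NbEmpty(TailList(S))
-- ===== SOURCE B (Python) =====
-- def NbEmpty(S):
--     count = 0
--     for x in S:
--         if x == []:
--             count += 1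
--     return count
-- ===== Notes on version B (the rewrite author's own statement) =====
-- stated objective: simpler
-- what changed: Replaces A's head/tail structural recursion (with FirstList/TailList/IsEmpty helpers) by a single iterative loop accumulating a counter.
import Mathlib
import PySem

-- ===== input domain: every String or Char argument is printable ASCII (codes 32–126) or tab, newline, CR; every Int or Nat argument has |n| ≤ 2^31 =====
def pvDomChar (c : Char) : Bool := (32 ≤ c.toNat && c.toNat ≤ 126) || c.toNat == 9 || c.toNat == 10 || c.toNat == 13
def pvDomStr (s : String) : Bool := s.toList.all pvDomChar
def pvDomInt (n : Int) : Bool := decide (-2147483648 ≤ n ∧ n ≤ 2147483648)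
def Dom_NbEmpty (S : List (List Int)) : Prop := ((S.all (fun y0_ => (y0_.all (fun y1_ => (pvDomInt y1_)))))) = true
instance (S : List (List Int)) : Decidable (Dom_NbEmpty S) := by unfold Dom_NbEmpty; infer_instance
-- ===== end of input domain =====

-- B replaces A's head/tail recursion with an iterative counter loop (simpler; return-value equivalence).

-- ===== PORT A =====
def FirstListA (S : List (List Int)) : Option (List Int) := PySem.List.pyGet? S 0

def TailListA (S : List (List Int)) : List (List Int) := PySem.List.slice S (some 1) none

def IsEmptyOuter (S : List (List Int)) : Bool := S == []

def IsEmptyInner (S : List Int) : Bool := S == []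

def NbEmpty (S : List (List Int)) : Int :=
  if IsEmptyOuter S then 0
  else
    match FirstListA S with
    | some h =>
        if IsEmptyInner h then 1 + NbEmpty (TailListA S)
        else NbEmpty (TailListA S)
    | none => 0   -- unreachable: S nonempty so S[0] exists
termination_by S.length
decreasing_by
  all_goals
    cases S with
    | nil => simp_all [IsEmptyOuter]
    | cons a t => simp [TailListA, PySem.List.slice_from_one]

-- ===== PORT B =====
def NbEmpty_alt (S : List (List Int)) : Int :=
  S.foldl (fun count x => if x == [] then count + 1 else count) 0

-- ===== PRECONDITION & SPEC =====
def Spec_NbEmpty (S : List (List Int)) (out : Int) : Prop := out = NbEmpty_alt S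
instance (S : List (List Int)) (out : Int) : Decidable (Spec_NbEmpty S out) := by unfold Spec_NbEmpty; infer_instance

-- ===== CLAIM (what is proved, stated in full; the proofs are below) =====
def Claim_equal_NbEmpty : Prop := ∀ (S : List (List Int)), Dom_NbEmpty S → Spec_NbEmpty S (NbEmpty S)

-- ===== LEMMAS AND PROOFS =====

theorem NbEmpty_alt_shift (S : List (List Int)) (c : Int) :
    S.foldl (fun count x => if x == [] then count + 1 else count) c
      = c + S.foldl (fun count x => if x == [] then count + 1 else count) 0 := by
  induction S generalizing c with
  | nil => simp
  | cons a t ih =>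
    simp only [List.foldl_cons]
    rw [ih, ih (if a == [] then 0 + 1 else 0)]
    split <;> ring

theorem NbEmpty_eq_alt (S : List (List Int)) : NbEmpty S = NbEmpty_alt S := by
  induction S with
  | nil => simp [NbEmpty, NbEmpty_alt, IsEmptyOuter]
  | cons a t ih =>
    rw [NbEmpty]
    have h1 : IsEmptyOuter (a :: t) = false := by simp [IsEmptyOuter]
    have h2 : FirstListA (a :: t) = some a := by
      simp [FirstListA, PySem.List.pyGet?, PySem.List.pyIdx?]
    have h3 : TailListA (a :: t) = t := by
      simp [TailListA, PySem.List.slice_from_one]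
    rw [h1, h2, h3]
    simp only [Bool.false_eq_true, if_false]
    unfold NbEmpty_alt
    simp only [List.foldl_cons]
    rw [NbEmpty_alt_shift t (if a == [] then 0 + 1 else 0)]
    unfold IsEmptyInner
    rw [ih]
    unfold NbEmpty_alt
    split <;> ring

-- ===== VERDICT (by name: the statement is the Claim_ definition above) =====
theorem NbEmpty_spec : Claim_equal_NbEmpty := by
  intro S _
  exact NbEmpty_eq_alt S
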